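-- pv_equiv track=rewrite | github.com/mikanakim/score4_AI | score4/kifu/game.py | inverse_convert
-- ===== SOURCE A (Python) =====
-- def inverse_convert(idx):
--     l = [0,0,0]#100*a + 10*b + cにする
--     for i in range(0,4):#ここのiはzの値をみてる
--         if idx < 16*(i+1) and idx >= 16*i:
--             #まずは1桁目から
--             if idx%4 == 0:
--                 l[0] = 1
--             elif idx%4 == 1:
--                 l[0] = 2
--             elif idx%4 == 2:
--                 l[0] = 3
--             elif idx%4 == 3:
--                 l[0] = 4
--
--             #2桁目
--             if idx-16*i == 0 or idx-16*i == 1 or idx-16*i == 2 or idx-16*i == 3: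
--                 l[1] = 1
--             elif idx-16*i == 4 or idx-16*i == 5 or idx-16*i == 6 or idx-16*i == 7:
--                 l[1] = 2
--             elif idx-16*i == idx-16*i == 8 or idx-16*i == 9 or idx-16*i == 10 or idx-16*i == 11:
--                 l[1] = 3
--             elif idx-16*i == idx-16*i == 12 or idx-16*i == 13 or idx-16*i == 14 or idx-16*i == 15:
--                 l[1] = 4
--
--             #3桁目
--             l[2] = i+1
--
--     idx = 100*l[0] + 10*l[1] + l[2]
--     return idx
-- ===== SOURCE B (Python) =====
-- def inverse_convert(idx):
--     # Closed-form decode: no loop, just digit arithmetic; 0 outside the 0..63 board.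
--     if 0 <= idx < 64:
--         return 100 * (idx % 4 + 1) + 10 * (idx // 4 % 4 + 1) + (idx // 16 + 1)
--     return 0
-- ===== Notes on version B (the rewrite author's own statement) =====
-- stated objective: simpler
-- what changed: Replaced A's four-iteration block scan with chained equality comparisons by a direct closed-form digit computation (idx%4, idx//4%4, idx//16) under a single in-range guard, preserving the zero result out of range.
import Mathlib
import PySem

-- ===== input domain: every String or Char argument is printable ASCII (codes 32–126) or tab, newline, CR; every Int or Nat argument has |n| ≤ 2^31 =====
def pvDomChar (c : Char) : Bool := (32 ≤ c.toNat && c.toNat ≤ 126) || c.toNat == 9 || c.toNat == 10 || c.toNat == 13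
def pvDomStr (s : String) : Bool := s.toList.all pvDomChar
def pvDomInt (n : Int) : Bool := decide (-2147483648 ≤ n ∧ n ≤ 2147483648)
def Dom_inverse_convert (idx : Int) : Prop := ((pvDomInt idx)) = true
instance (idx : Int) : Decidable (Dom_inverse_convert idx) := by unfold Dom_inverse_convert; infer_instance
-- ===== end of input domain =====

-- B replaces A's fixed 4-iteration block scan by a guarded closed-form digit computation (simpler).

-- ===== PORT A =====
-- one iteration of A's 'for i in range(0,4)' body over the state l = (l0, l1, l2)
def inverse_convert_step (idx : Int) (l : Int × Int × Int) (i : Int) : Int × Int × Int :=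
  if idx < 16 * (i + 1) ∧ idx ≥ 16 * i then
    let l0 :=
      if PySem.Int.mod idx 4 = 0 then 1
      else if PySem.Int.mod idx 4 = 1 then 2
      else if PySem.Int.mod idx 4 = 2 then 3
      else if PySem.Int.mod idx 4 = 3 then 4
      else l.1
    let l1 :=
      if idx - 16*i = 0 ∨ idx - 16*i = 1 ∨ idx - 16*i = 2 ∨ idx - 16*i = 3 then 1
      else if idx - 16*i = 4 ∨ idx - 16*i = 5 ∨ idx - 16*i = 6 ∨ idx - 16*i = 7 then 2
      -- 'idx-16*i == idx-16*i == 8' is Python's chained comparison: True ∧ (idx-16*i == 8)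
      else if idx - 16*i = 8 ∨ idx - 16*i = 9 ∨ idx - 16*i = 10 ∨ idx - 16*i = 11 then 3
      else if idx - 16*i = 12 ∨ idx - 16*i = 13 ∨ idx - 16*i = 14 ∨ idx - 16*i = 15 then 4
      else l.2.1
    (l0, l1, i + 1)
  else l

def inverse_convert (idx : Int) : Int :=
  let l := (PySem.List.pyRange 0 4 1).foldl (inverse_convert_step idx) (0, 0, 0)
  100 * l.1 + 10 * l.2.1 + l.2.2

-- ===== PORT B =====
def inverse_convert_alt (idx : Int) : Int :=
  if 0 ≤ idx ∧ idx < 64 then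
    100 * (PySem.Int.mod idx 4 + 1)
      + 10 * (PySem.Int.mod (PySem.Int.floordiv idx 4) 4 + 1)
      + (PySem.Int.floordiv idx 16 + 1)
  else 0

-- ===== PRECONDITION & SPEC =====
def Spec_inverse_convert (idx : Int) (out : Int) : Prop := out = inverse_convert_alt idx
instance (idx : Int) (out : Int) : Decidable (Spec_inverse_convert idx out) := by unfold Spec_inverse_convert; infer_instance

-- ===== CLAIM (what is proved, stated in full; the proofs are below) =====
def Claim_equal_inverse_convert : Prop := ∀ (idx : Int), Dom_inverse_convert idx → Spec_inverse_convert idx (inverse_convert idx)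

-- ===== LEMMAS AND PROOFS =====
-- an iteration whose range guard fails leaves the state unchanged
theorem step_out (idx i : Int) (h : ¬ (idx < 16 * (i + 1) ∧ idx ≥ 16 * i)) (l : Int × Int × Int) :
    inverse_convert_step idx l i = l := by
  unfold inverse_convert_step; rw [if_neg h]

-- the one iteration whose range guard holds produces exactly the closed-form digits
theorem step_active (idx i : Int) (l : Int × Int × Int)
    (h1 : 16 * i ≤ idx) (h2 : idx < 16 * (i + 1)) :
    100 * (inverse_convert_step idx l i).1 + 10 * (inverse_convert_step idx l i).2.1
        + (inverse_convert_step idx l i).2.2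
      = 100 * (idx % 4 + 1) + 10 * (idx / 4 % 4 + 1) + (idx / 16 + 1) := by
  have h4 : PySem.Int.mod idx 4 = idx % 4 := PySem.Int.mod_eq_emod_of_pos (by norm_num)
  simp only [inverse_convert_step, h4]
  rw [if_pos (⟨h2, h1⟩ : idx < 16 * (i + 1) ∧ idx ≥ 16 * i)]
  split_ifs <;> simp <;> omega

theorem inverse_convert_eq (idx : Int) : inverse_convert idx = inverse_convert_alt idx := by
  have h4 : PySem.Int.mod idx 4 = idx % 4 := PySem.Int.mod_eq_emod_of_pos (by norm_num)
  have hd16 : PySem.Int.floordiv idx 16 = idx / 16 := PySem.Int.floordiv_eq_ediv_of_pos (by norm_num)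
  have hm4 : PySem.Int.mod (PySem.Int.floordiv idx 4) 4 = (idx / 4) % 4 := by
    rw [PySem.Int.floordiv_eq_ediv_of_pos (by norm_num : (0:Int) < 4)]
    exact PySem.Int.mod_eq_emod_of_pos (by norm_num)
  have hr : PySem.List.pyRange 0 4 1 = [0, 1, 2, 3] := by decide
  unfold inverse_convert inverse_convert_alt
  rw [hr, hm4, h4, hd16]
  show 100 * (List.foldl (inverse_convert_step idx) (0, 0, 0) [0, 1, 2, 3]).1
      + 10 * (List.foldl (inverse_convert_step idx) (0, 0, 0) [0, 1, 2, 3]).2.1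
      + (List.foldl (inverse_convert_step idx) (0, 0, 0) [0, 1, 2, 3]).2.2 = _
  simp only [List.foldl]
  by_cases c0 : idx < 0
  · rw [step_out idx 0 (by omega), step_out idx 1 (by omega), step_out idx 2 (by omega),
      step_out idx 3 (by omega), if_neg (by omega)]
    norm_num
  by_cases c3 : 64 ≤ idx
  · rw [step_out idx 0 (by omega), step_out idx 1 (by omega), step_out idx 2 (by omega),
      step_out idx 3 (by omega), if_neg (by omega)]
    norm_num
  rw [if_pos (by omega : 0 ≤ idx ∧ idx < 64)]
  by_cases h0 : idx < 16
  · rw [step_out idx 1 (by omega), step_out idx 2 (by omega), step_out idx 3 (by omega)]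
    exact step_active idx 0 _ (by omega) (by omega)
  by_cases h1 : idx < 32
  · rw [step_out idx 2 (by omega), step_out idx 3 (by omega), step_out idx 0 (by omega)]
    exact step_active idx 1 _ (by omega) (by omega)
  by_cases h2 : idx < 48
  · rw [step_out idx 3 (by omega), step_out idx 0 (by omega), step_out idx 1 (by omega)]
    exact step_active idx 2 _ (by omega) (by omega)
  · rw [step_out idx 0 (by omega), step_out idx 1 (by omega), step_out idx 2 (by omega)]
    exact step_active idx 3 _ (by omega) (by omega)

-- ===== VERDICT (by name: the statement is the Claim_ definition above) =====
theorem inverse_convert_spec : Claim_equal_inverse_convert := by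
  intro idx _
  unfold Spec_inverse_convert
  exact inverse_convert_eq idx
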